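-- pv_equiv track=rewrite | github.com/hacatu/project-euler | 300/p300.py | foldings_rec
-- ===== SOURCE A (Python) =====
-- option_map = {
-- 	(i, j): ((i, j), (-j, i), (j, -i)) for (i, j) in ((1,0),(-1,0),(0,1),(0,-1))
-- }
--
-- def foldings_rec(N, pos=(0,0), options=((0,-1),(1,0)), spots=None):
-- 	count = 1
-- 	if N > 1:
-- 		if spots is None:
-- 			spots = set()
-- 		spots.add(pos)
-- 		x, y = pos
-- 		for d in options:
-- 			dx, dy = d
-- 			n_pos = (x + dx, y + dy)
-- 			if n_pos not in spots:
-- 				count += foldings_rec(N-1, n_pos, option_map[d], spots)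
-- 		spots.remove(pos)
-- 	return count
-- ===== SOURCE B (Python) =====
-- option_map = {
-- 	(i, j): ((i, j), (-j, i), (j, -i)) for (i, j) in ((1,0),(-1,0),(0,1),(0,-1))
-- }
--
-- def foldings_rec(N, pos=(0,0), options=((0,-1),(1,0)), spots=None):
-- 	# Iterative backtracking DFS with an explicit stack; counts one per visited
-- 	# node, interleaving undo markers to maintain `spots` (same net mutation as
-- 	# the recursive version).
-- 	if spots is None:
-- 		spots = set()
-- 	count = 0
-- 	stack = [(N, pos, options)]
-- 	while stack:
-- 		frame = stack.pop()
-- 		if frame[0] is None:  # undo marker: leave this node's position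
-- 			spots.remove(frame[1])
-- 			continue
-- 		n, p, opts = frame
-- 		count += 1
-- 		if n > 1:
-- 			spots.add(p)
-- 			stack.append((None, p))
-- 			x, y = p
-- 			for d in opts:
-- 				dx, dy = d
-- 				np = (x + dx, y + dy)
-- 				if np not in spots:
-- 					stack.append((n - 1, np, option_map[d]))
-- 	return count
-- ===== Notes on version B (the rewrite author's own statement) =====
-- stated objective: alternative
-- what changed: Replaced the self-avoiding-walk counting recursion by an iterative depth-first search over an explicit stack of (N,pos,options) frames with undo markers maintaining the visited set, counting one per popped node.
import Mathlib
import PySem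

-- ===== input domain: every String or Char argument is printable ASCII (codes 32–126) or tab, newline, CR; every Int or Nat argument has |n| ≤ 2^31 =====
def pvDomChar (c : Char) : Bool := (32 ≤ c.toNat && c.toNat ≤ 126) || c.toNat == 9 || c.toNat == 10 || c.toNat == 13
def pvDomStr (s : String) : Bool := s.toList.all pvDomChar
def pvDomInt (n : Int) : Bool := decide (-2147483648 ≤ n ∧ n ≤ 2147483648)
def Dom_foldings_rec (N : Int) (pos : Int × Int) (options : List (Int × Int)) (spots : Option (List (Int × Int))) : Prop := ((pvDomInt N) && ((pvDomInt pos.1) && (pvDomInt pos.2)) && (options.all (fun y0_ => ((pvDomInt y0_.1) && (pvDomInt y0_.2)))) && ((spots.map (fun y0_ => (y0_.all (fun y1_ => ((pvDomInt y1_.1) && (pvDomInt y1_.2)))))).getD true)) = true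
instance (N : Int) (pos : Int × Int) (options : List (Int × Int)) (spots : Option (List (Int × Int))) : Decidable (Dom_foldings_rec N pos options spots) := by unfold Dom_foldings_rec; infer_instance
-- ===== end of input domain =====

-- B replaces the recursion by an explicit-stack iterative DFS with undo markers (alternative
-- decomposition, same cost). Python A and B both mutate a caller-passed `spots` set identically
-- (net zero unless pos was already in it); the equivalence proved here is about the return value.

-- ===== PORT A =====
-- option_map = {(i,j): ((i,j),(-j,i),(j,-i)) for (i,j) in ((1,0),(-1,0),(0,1),(0,-1))}
def option_map : PySem.Dict (Int × Int) (List (Int × Int)) :=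
  PySem.Dict.ofList (([((1:Int),(0:Int)),(-1,0),(0,1),(0,-1)] : List (Int × Int)).map
    (fun ij => (ij, [ij, (-ij.2, ij.1), (ij.2, -ij.1)])))

-- A's recursion, fuel = max(N-1,0) (A recurses with N-1 and stops at N ≤ 1).  `option_map[d]`
-- raises KeyError in Python when d is no key and the neighbour is unvisited; Pre_ excludes
-- exactly those inputs, so the `.getD []` default is never the claimed value.
-- A's trailing `spots.remove(pos)` only undoes the earlier mutation; with immutable lists the
-- restored set is simply `spots`, so the loop below threads `spots1` and needs no removal.
mutual
def foldA : Nat → (Int × Int) → List (Int × Int) → List (Int × Int) → Int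
  | 0, _, _, _ => 1
  | Nat.succ m, pos, options, spots => goA m pos options (PySem.Set.add spots pos) 1
termination_by m _ _ _ => (m, 0)
def goA : Nat → (Int × Int) → List (Int × Int) → List (Int × Int) → Int → Int
  | _, _, [], _, count => count
  | m, pos, d :: ds, spots, count =>
      goA m pos ds spots
        (if PySem.Set.contains spots (pos.1 + d.1, pos.2 + d.2) then count
         else count + foldA m (pos.1 + d.1, pos.2 + d.2) ((option_map.get? d).getD []) spots)
termination_by m _ ds _ _ => (m, ds.length + 1)
end

def foldings_rec (N : Int) (pos : Int × Int) (options : List (Int × Int)) (spots : Option (List (Int × Int))) : Int :=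
  foldA (N - 1).toNat pos options (spots.getD [])

-- ===== PORT B =====
-- a stack frame of Source B: (n, p, opts) or the undo marker (None, p)
inductive PFrame where
  | visit (n : Int) (p : Int × Int) (opts : List (Int × Int))
  | undo (p : Int × Int)
deriving Repr, DecidableEq

-- the body of Source B's inner `for d in opts` loop: push unvisited neighbours
def pushChild (n : Int) (p : Int × Int) (spots : List (Int × Int)) (st : List PFrame) (d : Int × Int) : List PFrame :=
  if PySem.Set.contains spots (p.1 + d.1, p.2 + d.2) then st
  else PFrame.visit (n - 1) (p.1 + d.1, p.2 + d.2) ((option_map.get? d).getD []) :: st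

-- Source B's inner for-loop over opts, pushing onto stack st
def pushAll (n : Int) (p : Int × Int) (spots : List (Int × Int)) (st : List PFrame) (opts : List (Int × Int)) : List PFrame :=
  opts.foldl (pushChild n p spots) st

-- termination measure for the while loop (proof bookkeeping only)
def gB : Nat → Nat
  | 0 => 1
  | m + 1 => 2 + 3 * gB m

def wB : PFrame → Nat
  | .undo _ => 1
  | .visit n _ opts => 1 + if n > 1 then 1 + opts.length * gB (n - 2).toNat else 0

def muB (st : List PFrame) : Nat := (st.map wB).sum

theorem gB_pos (m : Nat) : 1 ≤ gB m := by
  cases m with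
  | zero => simp [gB]
  | succ m => simp only [gB]; omega

theorem optmap_len (d : Int × Int) : ((option_map.get? d).getD []).length ≤ 3 := by
  rcases h : option_map.get? d with _ | v
  · simp
  · have hmem := PySem.Dict.mem_items_of_get?_eq_some option_map h
    have hitems : option_map.items =
        [((1, 0), [(1, 0), (0, 1), (0, -1)]), ((-1, 0), [(-1, 0), (0, -1), (0, 1)]),
         ((0, 1), [(0, 1), (-1, 0), (1, 0)]), ((0, -1), [(0, -1), (1, 0), (-1, 0)])] := by rfl
    rw [hitems] at hmem
    fin_cases hmem <;> simp

theorem wB_child (n : Int) (np : Int × Int) (d : Int × Int) :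
    wB (PFrame.visit (n - 1) np ((option_map.get? d).getD [])) ≤ gB (n - 2).toNat := by
  have hlen := optmap_len d
  by_cases h : n - 1 > 1
  · have h2 : ((n : Int) - 2).toNat = (n - 1 - 2).toNat + 1 := by omega
    have h3 : ((n : Int) - 1 - 2).toNat = (n - 3).toNat := by omega
    simp only [wB, if_pos h, h2, gB]
    have := gB_pos (n - 1 - 2).toNat
    nlinarith [gB_pos ((n:Int) - 1 - 2).toNat]
  · simp only [wB, if_neg h]
    have := gB_pos ((n:Int) - 2).toNat
    omega

theorem muB_cons (f : PFrame) (st : List PFrame) : muB (f :: st) = wB f + muB st := by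
  simp [muB]

theorem muB_foldl (n : Int) (p : Int × Int) (spots : List (Int × Int)) :
    ∀ (opts : List (Int × Int)) (st : List PFrame),
      muB (opts.foldl (pushChild n p spots) st) ≤ muB st + opts.length * gB (n - 2).toNat := by
  intro opts
  induction opts with
  | nil => intro st; simp
  | cons d ds ih =>
      intro st
      have hstep : muB (pushChild n p spots st d) ≤ muB st + gB (n - 2).toNat := by
        rw [pushChild]
        split
        · have := gB_pos ((n:Int) - 2).toNat; omega
        · rw [muB_cons]
          have := wB_child n (p.1 + d.1, p.2 + d.2) d
          omega
      calc muB ((d :: ds).foldl (pushChild n p spots) st)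
          = muB (ds.foldl (pushChild n p spots) (pushChild n p spots st d)) := by simp [List.foldl]
        _ ≤ muB (pushChild n p spots st d) + ds.length * gB (n - 2).toNat := ih _
        _ ≤ muB st + gB (n - 2).toNat + ds.length * gB (n - 2).toNat := by omega
        _ ≤ muB st + (d :: ds).length * gB (n - 2).toNat := by
              simp [List.length_cons]; ring_nf; omega

-- Source B's while loop: pop a frame; undo markers remove their position (always present, so
-- set.remove = List.erase here); node frames count 1 and, when n > 1, push the undo marker
-- and the unvisited neighbours.
def loopB : List PFrame → List (Int × Int) → Int → Int
  | [], _, count => count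
  | PFrame.undo p :: rest, spots, count => loopB rest (spots.erase p) count
  | PFrame.visit n p opts :: rest, spots, count =>
      if h : n > 1 then
        let spots1 := PySem.Set.add spots p
        loopB (pushAll n p spots1 (PFrame.undo p :: rest) opts) spots1 (count + 1)
      else loopB rest spots (count + 1)
termination_by st _ _ => muB st
decreasing_by
  · simp [muB_cons, wB]
  · have h1 := muB_foldl n p (PySem.Set.add spots p) opts (PFrame.undo p :: rest)
    simp only [muB_cons] at h1 ⊢
    simp only [wB] at h1
    simp only [pushAll, wB, if_pos h]
    omega
  · simp [muB_cons, wB]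

def foldings_rec_alt (N : Int) (pos : Int × Int) (options : List (Int × Int)) (spots : Option (List (Int × Int))) : Int :=
  loopB [PFrame.visit N pos options] (spots.getD []) 0

-- ===== PRECONDITION & SPEC =====
-- Pre_ excludes exactly the inputs where Python A raises KeyError: N > 1 and some direction in
-- `options` that is not a key of option_map while its neighbour is unvisited (option_map[d] is
-- only evaluated when `n_pos not in spots`); recursive calls always pass keys of option_map.
def Pre_foldings_rec (N : Int) (pos : Int × Int) (options : List (Int × Int)) (spots : Option (List (Int × Int))) : Prop :=
  N ≤ 1 ∨ ∀ d ∈ options, option_map.contains d = true ∨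
    PySem.Set.contains (PySem.Set.add (spots.getD []) pos) (pos.1 + d.1, pos.2 + d.2) = true
instance (N : Int) (pos : Int × Int) (options : List (Int × Int)) (spots : Option (List (Int × Int))) : Decidable (Pre_foldings_rec N pos options spots) := by unfold Pre_foldings_rec; infer_instance

def pvWitness_foldings_rec : Int × (Int × Int) × (List (Int × Int)) × (Option (List (Int × Int))) :=
  (4, (0, 0), [(0, -1), (1, 0)], none)

def Spec_foldings_rec (N : Int) (pos : Int × Int) (options : List (Int × Int)) (spots : Option (List (Int × Int))) (out : Int) : Prop := out = foldings_rec_alt N pos options spots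
instance (N : Int) (pos : Int × Int) (options : List (Int × Int)) (spots : Option (List (Int × Int))) (out : Int) : Decidable (Spec_foldings_rec N pos options spots out) := by unfold Spec_foldings_rec; infer_instance

-- ===== CLAIM (what is proved, stated in full; the proofs are below) =====
def Claim_equal_foldings_rec : Prop := ∀ (N : Int) (pos : Int × Int) (options : List (Int × Int)) (spots : Option (List (Int × Int))), Dom_foldings_rec N pos options spots → Pre_foldings_rec N pos options spots → Spec_foldings_rec N pos options spots (foldings_rec N pos options spots)

-- ===== LEMMAS AND PROOFS =====

theorem goA_acc (m : Nat) (p : Int × Int) (s : List (Int × Int)) :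
    ∀ (opts : List (Int × Int)) (c : Int), goA m p opts s c = c + goA m p opts s 0 := by
  intro opts
  induction opts with
  | nil => intro c; simp [goA]
  | cons d ds ih =>
      intro c
      simp only [goA]
      split
      · rw [ih c, ih 0]
      · rw [ih (c + _), ih (0 + _)]
        ring

theorem goA_append (m : Nat) (p : Int × Int) (s : List (Int × Int)) :
    ∀ (xs ys : List (Int × Int)) (c : Int),
      goA m p (xs ++ ys) s c = goA m p ys s (goA m p xs s c) := by
  intro xs
  induction xs with
  | nil => intro ys c; simp [goA]
  | cons d ds ih => intro ys c; simp only [List.cons_append, goA]; rw [ih]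

theorem erase_add_of_not_contains (s : List (Int × Int)) (x : Int × Int)
    (h : PySem.Set.contains s x = false) : (PySem.Set.add s x).erase x = s := by
  have hx : x ∉ s := by
    intro hmem
    rw [← PySem.Set.contains_iff s x] at hmem
    rw [h] at hmem
    exact Bool.false_ne_true hmem
  rw [PySem.Set.add_of_not_mem hx]
  rw [List.erase_append_right _ hx]
  simp

theorem main_loopB (m : Nat) :
    ∀ (n : Int) (p : Int × Int) (opts : List (Int × Int)) (rest : List PFrame)
      (spots : List (Int × Int)) (count : Int), (n - 1).toNat ≤ m →
      loopB (PFrame.visit n p opts :: rest) spots count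
        = loopB rest (if n > 1 then (PySem.Set.add spots p).erase p else spots)
            (count + foldA (n - 1).toNat p opts spots) := by
  induction m with
  | zero =>
      intro n p opts rest spots count hm
      have hn : ¬ n > 1 := by omega
      have h0 : ((n : Int) - 1).toNat = 0 := by omega
      rw [loopB, dif_neg hn, h0, if_neg hn]
      simp [foldA]
  | succ m ih =>
      intro n p opts rest spots count hm
      by_cases hn : n > 1
      · have hk : ((n : Int) - 1).toNat = (n - 2).toNat + 1 := by omega
        have hkm : ((n : Int) - 2).toNat ≤ m := by omega
        set k := ((n : Int) - 2).toNat with hkdef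
        set spots1 := PySem.Set.add spots p with hs1
        have peel : ∀ (opts' : List (Int × Int)) (c : Int),
            loopB (pushAll n p spots1 (PFrame.undo p :: rest) opts') spots1 c
              = loopB (PFrame.undo p :: rest) spots1 (c + goA k p opts' spots1 0) := by
          intro opts'
          induction opts' using List.reverseRecOn with
          | nil => intro c; simp [pushAll, goA]
          | append_singleton xs d ihx =>
              intro c
              rw [pushAll, List.foldl_append, List.foldl_cons, List.foldl_nil]
              rw [show ∀ st, List.foldl (pushChild n p spots1) st xs = pushAll n p spots1 st xs from fun _ => rfl]
              rw [goA_append]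
              by_cases hc : PySem.Set.contains spots1 (p.1 + d.1, p.2 + d.2) = true
              · rw [pushChild]
                simp only [hc, if_true, goA]
                exact ihx c
              · rw [pushChild]
                simp only [hc]
                have hcf : PySem.Set.contains spots1 (p.1 + d.1, p.2 + d.2) = false := by
                  simpa using hc
                simp only [Bool.false_eq_true, if_false]
                have hn1 : ((n : Int) - 1 - 1).toNat = k := by omega
                rw [ih (n - 1) (p.1 + d.1, p.2 + d.2) _ _ spots1 c (by omega)]
                have hsp : (if n - 1 > 1 then
                    (PySem.Set.add spots1 (p.1 + d.1, p.2 + d.2)).erase (p.1 + d.1, p.2 + d.2)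
                  else spots1) = spots1 := by
                  split
                  · exact erase_add_of_not_contains _ _ hcf
                  · rfl
                rw [hsp, hn1, ihx]
                congr 1
                simp only [goA, hcf, Bool.false_eq_true, if_false]
                ring
        rw [loopB, dif_pos hn]
        rw [peel opts (count + 1)]
        rw [loopB]
        rw [if_pos hn, hk]
        rw [foldA]
        congr 1
        rw [goA_acc k p _ opts 1]
        ring
      · have h0 : ((n : Int) - 1).toNat = 0 := by omega
        rw [loopB, dif_neg hn, h0, if_neg hn]
        simp [foldA]

-- ===== VERDICT (by name: the statement is the Claim_ definition above) =====
theorem foldings_rec_spec : Claim_equal_foldings_rec := by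
  intro N pos options spots _ _
  unfold Spec_foldings_rec foldings_rec foldings_rec_alt
  rw [main_loopB (N - 1).toNat N pos options [] (spots.getD []) 0 le_rfl]
  simp [loopB]
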